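-- pv_equiv track=rewrite | github.com/tmu-nlp/100knock2018 | Shi-ma/chapter06/knock59.py | make_NP_split_list
-- ===== SOURCE A (Python) =====
-- def make_NP_split_list(s_list):
--     if '(NP' not in s_list:
--         return
--     else:
--         count = 0
--         NP_split = list()
--         for s in s_list:
--             if count == 0:
--                 if s == '(NP':
--                     count += 1
--                     NP_split.append(s)
--             else:
--                 if '(' in s:
--                     count += 1
--                     NP_split.append(s)
--                 elif ')' in s:
--                     count -= s.count(')')
--                     NP_split.append(s)
--                 if count <= 0:
--                     yield from make_NP_split_list(NP_split[1:])
--                     yield NP_split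
--                     count = 0
--                     NP_split = list()
-- ===== SOURCE B (Python) =====
-- def make_NP_split_list(s_list):
--     # One forward pass with an explicit stack of open NP frames instead of
--     # recursive re-scanning; emits the same spans in the same post-order.
--     stack = []  # frames: [tokens, open_count, pending_inner_outputs]
--     for s in s_list:
--         if not stack:
--             if s == '(NP':
--                 stack.append([['(NP'], 1, []])
--             continue
--         if '(' in s:
--             for fr in stack:
--                 fr[0].append(s)
--                 fr[1] += 1
--             if s == '(NP':
--                 stack.append([[s], 1, []])
--         elif ')' in s:
--             d = s.count(')')
--             for fr in stack:
--                 fr[0].append(s)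
--                 fr[1] -= d
--             while stack and stack[-1][1] <= 0:
--                 tokens, _, pending = stack.pop()
--                 out = pending + [tokens]
--                 if stack:
--                     stack[-1][2].extend(out)
--                 else:
--                     yield from out
-- ===== Notes on version B (the rewrite author's own statement) =====
-- stated objective: alternative
-- what changed: Replaces A's recursive generator, which on every completed NP span re-invokes itself on NP_split[1:] to re-scan the span for nested NPs, by a single forward pass that maintains an explicit stack of open NP frames (tokens, open-paren count, pending inner outputs) and emits the same spans in the same inner-before-outer order with no recursion and no re-scanning.
import Mathlib
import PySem

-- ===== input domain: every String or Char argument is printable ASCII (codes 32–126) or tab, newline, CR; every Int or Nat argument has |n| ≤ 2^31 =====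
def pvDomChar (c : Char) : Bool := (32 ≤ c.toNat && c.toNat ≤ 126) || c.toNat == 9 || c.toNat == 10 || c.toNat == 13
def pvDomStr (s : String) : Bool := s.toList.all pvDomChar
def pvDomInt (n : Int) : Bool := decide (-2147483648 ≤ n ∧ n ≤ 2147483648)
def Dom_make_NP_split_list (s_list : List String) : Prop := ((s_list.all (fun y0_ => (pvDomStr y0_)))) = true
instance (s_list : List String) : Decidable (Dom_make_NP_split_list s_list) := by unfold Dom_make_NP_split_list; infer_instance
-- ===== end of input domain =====

-- B replaces A's recursive re-scanning generator by a single forward pass with an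
-- explicit stack of open NP frames (objective: alternative decomposition, same output).
-- A is a Python generator; both ports return the list of all yielded values.

-- ===== PORT A =====
-- A, literally: top-level loop with count/NP_split; on close, recursion on NP_split[1:].
-- The fuel argument only makes the recursion total: recursive calls are on strictly
-- shorter lists, so fuel (length + 1) at the top is never exhausted.
mutual
def make_NP_fuel : Nat → List String → List (List String)
  | 0, _ => []
  | f+1, s_list =>
    if "(NP" ∈ s_list then make_NP_loop f s_list 0 [] else []
termination_by f _ => (f, 0)

def make_NP_loop : Nat → List String → Int → List String → List (List String)
  | _, [], _, _ => []
  | f, s :: rest, count, np =>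
    if count = 0 then
      if s = "(NP" then make_NP_loop f rest (count + 1) (np ++ [s])
      else make_NP_loop f rest count np
    else
      let st : Int × List String :=
        if PySem.Str.isIn "(" s then (count + 1, np ++ [s])
        else if PySem.Str.isIn ")" s then (count - (PySem.Str.count s ")" : Int), np ++ [s])
        else (count, np)
      if st.1 ≤ 0 then
        make_NP_fuel f (st.2.drop 1) ++ [st.2] ++ make_NP_loop f rest 0 []
      else make_NP_loop f rest st.1 st.2
termination_by f rest _ _ => (f, rest.length + 1)
end

def make_NP_split_list (s_list : List String) : List (List String) :=
  make_NP_fuel (s_list.length + 1) s_list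

-- ===== PORT B =====
-- B: one pass, explicit stack of open frames (tokens, open-paren count, pending inner
-- outputs); list head = innermost frame (Python's stack[-1]).
abbrev NPFrame := List String × Int × List (List String)

-- the `while stack and stack[-1][1] <= 0` pop loop
def pvPopNP : List NPFrame → List (List String) → List NPFrame × List (List String)
  | [], acc => ([], acc)
  | [fr], acc =>
      if fr.2.1 ≤ 0 then ([], acc ++ fr.2.2 ++ [fr.1]) else ([fr], acc)
  | fr :: fr2 :: σ, acc =>
      if fr.2.1 ≤ 0 then
        pvPopNP ((fr2.1, fr2.2.1, fr2.2.2 ++ fr.2.2 ++ [fr.1]) :: σ) acc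
      else (fr :: fr2 :: σ, acc)
termination_by σ _ => σ.length

-- one iteration of the `for s in s_list` loop, state = (stack, output so far)
def pvStepNP (st : List NPFrame × List (List String)) (s : String) : List NPFrame × List (List String) :=
  if st.1.isEmpty then
    if s = "(NP" then ([(["(NP"], 1, [])], st.2) else st
  else if PySem.Str.isIn "(" s then
    let σ' := st.1.map (fun g => (g.1 ++ [s], g.2.1 + 1, g.2.2))
    (if s = "(NP" then ([s], 1, []) :: σ' else σ', st.2)
  else if PySem.Str.isIn ")" s then
    pvPopNP (st.1.map (fun g => (g.1 ++ [s], g.2.1 - (PySem.Str.count s ")" : Int), g.2.2))) st.2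
  else st

def make_NP_split_list_alt (s_list : List String) : List (List String) :=
  (s_list.foldl pvStepNP ([], [])).2

-- ===== PRECONDITION & SPEC =====
def Spec_make_NP_split_list (s_list : List String) (out : List (List String)) : Prop := out = make_NP_split_list_alt s_list
instance (s_list : List String) (out : List (List String)) : Decidable (Spec_make_NP_split_list s_list out) := by unfold Spec_make_NP_split_list; infer_instance

-- ===== CLAIM (what is proved, stated in full; the proofs are below) =====
def Claim_equal_make_NP_split_list : Prop := ∀ (s_list : List String), Dom_make_NP_split_list s_list → Spec_make_NP_split_list s_list (make_NP_split_list s_list)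

-- ===== LEMMAS AND PROOFS =====

-- run of B's machine from the empty state
def runNP (l : List String) : List NPFrame × List (List String) :=
  l.foldl pvStepNP ([], [])

-- B's stack while A's frame (np, count) is open: the stack B reaches on np[1:], with
-- the bottom frame (np, count, output-so-far-of-np[1:]) underneath.
def stateOf (np : List String) (count : Int) : List NPFrame :=
  if 0 < count then
    (runNP (np.drop 1)).1 ++ [(np, count, (runNP (np.drop 1)).2)]
  else []




-- unfolding equations for pvPopNP, derived once (cheap rewriting afterwards)
lemma popNP_one (fr : NPFrame) (acc : List (List String)) :
    pvPopNP [fr] acc = if fr.2.1 ≤ 0 then ([], acc ++ fr.2.2 ++ [fr.1]) else ([fr], acc) := by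
  simp [pvPopNP]

lemma popNP_cons (fr fr2 : NPFrame) (σ : List NPFrame) (acc : List (List String)) :
    pvPopNP (fr :: fr2 :: σ) acc =
      if fr.2.1 ≤ 0 then
        pvPopNP ((fr2.1, fr2.2.1, fr2.2.2 ++ fr.2.2 ++ [fr.1]) :: σ) acc
      else (fr :: fr2 :: σ, acc) := by
  simp [pvPopNP]

-- count projections of the frames a pop leaves are among the input's
lemma pop_cnt_mem : ∀ (σt : List NPFrame) (fr : NPFrame) (acc : List (List String)) (g : NPFrame),
    g ∈ (pvPopNP (fr :: σt) acc).1 → ∃ g' ∈ fr :: σt, g.2.1 = g'.2.1 := by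
  intro σt
  induction σt with
  | nil =>
      intro fr acc g hg
      by_cases hfr : fr.2.1 ≤ 0
      · simp [popNP_one, popNP_cons, hfr] at hg
      · simp [popNP_one, popNP_cons, hfr] at hg
        exact ⟨fr, by simp, by simp [hg]⟩
  | cons fr2 σ ih =>
      intro fr acc g hg
      by_cases hfr : fr.2.1 ≤ 0
      · rw [show pvPopNP (fr :: fr2 :: σ) acc
            = pvPopNP ((fr2.1, fr2.2.1, fr2.2.2 ++ fr.2.2 ++ [fr.1]) :: σ) acc from by
          simp [popNP_one, popNP_cons, hfr]] at hg
        rcases ih _ _ _ hg with ⟨g', hg', he⟩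
        rcases List.mem_cons.mp hg' with h1 | h1
        · exact ⟨fr2, by simp, by simp [he, h1]⟩
        · exact ⟨g', by simp [h1], he⟩
      · simp [popNP_one, popNP_cons, hfr] at hg
        rcases hg with h1 | h1 | h1
        · exact ⟨fr, by simp, by simp [h1]⟩
        · exact ⟨fr2, by simp, by simp [h1]⟩
        · exact ⟨g, by simp [h1], rfl⟩

-- the pop loop stops only on an open frame
lemma pop_head_pos : ∀ (σt : List NPFrame) (fr : NPFrame) (acc : List (List String)) (h : NPFrame)
    (t : List NPFrame), (pvPopNP (fr :: σt) acc).1 = h :: t → 0 < h.2.1 := by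
  intro σt
  induction σt with
  | nil =>
      intro fr acc h t he
      by_cases hfr : fr.2.1 ≤ 0
      · simp [popNP_one, popNP_cons, hfr] at he
      · simp [popNP_one, popNP_cons, hfr] at he
        rw [← he.1]; omega
  | cons fr2 σ ih =>
      intro fr acc h t he
      by_cases hfr : fr.2.1 ≤ 0
      · rw [show pvPopNP (fr :: fr2 :: σ) acc
            = pvPopNP ((fr2.1, fr2.2.1, fr2.2.2 ++ fr.2.2 ++ [fr.1]) :: σ) acc from by
          simp [popNP_one, popNP_cons, hfr]] at he
        exact ih _ _ _ _ he
      · simp [popNP_cons, hfr] at he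
        rw [← he.1]; omega

-- the output accumulator is only appended to
lemma pop_thread : ∀ (σt : List NPFrame) (fr : NPFrame) (acc : List (List String)),
    pvPopNP (fr :: σt) acc = ((pvPopNP (fr :: σt) []).1, acc ++ (pvPopNP (fr :: σt) []).2) := by
  intro σt
  induction σt with
  | nil =>
      intro fr acc
      by_cases hfr : fr.2.1 ≤ 0 <;> simp [popNP_one, popNP_cons, hfr]
  | cons fr2 σ ih =>
      intro fr acc
      by_cases hfr : fr.2.1 ≤ 0
      · have e1 : ∀ a : List (List String), pvPopNP (fr :: fr2 :: σ) a
            = pvPopNP ((fr2.1, fr2.2.1, fr2.2.2 ++ fr.2.2 ++ [fr.1]) :: σ) a := by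
          intro a; simp [popNP_one, popNP_cons, hfr]
        rw [e1, e1]
        exact ih _ acc
      · simp [popNP_one, popNP_cons, hfr]

-- if frames remain after popping, nothing escaped to the accumulator
lemma pop_out_nil : ∀ (σt : List NPFrame) (fr : NPFrame),
    (pvPopNP (fr :: σt) []).1 ≠ [] → (pvPopNP (fr :: σt) []).2 = [] := by
  intro σt
  induction σt with
  | nil =>
      intro fr hne
      by_cases hfr : fr.2.1 ≤ 0
      · simp [popNP_one, popNP_cons, hfr] at hne
      · simp [popNP_one, popNP_cons, hfr]
  | cons fr2 σ ih =>
      intro fr hne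
      by_cases hfr : fr.2.1 ≤ 0
      · rw [show pvPopNP (fr :: fr2 :: σ) ([] : List (List String))
            = pvPopNP ((fr2.1, fr2.2.1, fr2.2.2 ++ fr.2.2 ++ [fr.1]) :: σ) [] from by
          simp [popNP_one, popNP_cons, hfr]] at hne ⊢
        exact ih _ hne
      · simp [popNP_cons, hfr]

-- popping with an extra (bottom) frame underneath: upper pops proceed unchanged
lemma pop_append_ne : ∀ (σt : List NPFrame) (fr b : NPFrame) (acc : List (List String))
    (h : NPFrame) (t : List NPFrame), (pvPopNP (fr :: σt) []).1 = h :: t →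
    pvPopNP ((fr :: σt) ++ [b]) acc = (h :: t ++ [b], acc) := by
  intro σt
  induction σt with
  | nil =>
      intro fr b acc h t he
      by_cases hfr : fr.2.1 ≤ 0
      · simp [popNP_one, popNP_cons, hfr] at he
      · simp [popNP_one, popNP_cons, hfr] at he
        obtain ⟨rfl, rfl⟩ := he
        simp [popNP_cons, hfr]
  | cons fr2 σ ih =>
      intro fr b acc h t he
      by_cases hfr : fr.2.1 ≤ 0
      · rw [show pvPopNP (fr :: fr2 :: σ) ([] : List (List String))
            = pvPopNP ((fr2.1, fr2.2.1, fr2.2.2 ++ fr.2.2 ++ [fr.1]) :: σ) [] from by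
          simp [popNP_one, popNP_cons, hfr]] at he
        rw [show pvPopNP ((fr :: fr2 :: σ) ++ [b]) acc
            = pvPopNP (((fr2.1, fr2.2.1, fr2.2.2 ++ fr.2.2 ++ [fr.1]) :: σ) ++ [b]) acc from by
          simp [popNP_one, popNP_cons, hfr]]
        exact ih _ _ _ _ _ he
      · simp [popNP_cons, hfr] at he
        obtain ⟨rfl, rfl⟩ := he
        simp [popNP_cons, hfr]

-- when the uppers all pop, everything they emitted lands in the bottom frame's pending
lemma pop_append_nil : ∀ (σt : List NPFrame) (fr : NPFrame) (b1 : List String) (b2 : Int)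
    (b3 : List (List String)) (acc : List (List String)),
    (pvPopNP (fr :: σt) []).1 = [] →
    pvPopNP ((fr :: σt) ++ [(b1, b2, b3)]) acc
      = pvPopNP [(b1, b2, b3 ++ (pvPopNP (fr :: σt) []).2)] acc := by
  intro σt
  induction σt with
  | nil =>
      intro fr b1 b2 b3 acc he
      by_cases hfr : fr.2.1 ≤ 0
      · have h2 : (pvPopNP [fr] ([] : List (List String))).2 = fr.2.2 ++ [fr.1] := by
          simp [popNP_one, popNP_cons, hfr]
        rw [h2]
        rw [show pvPopNP ([fr] ++ [(b1, b2, b3)]) acc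
            = pvPopNP [(b1, b2, b3 ++ fr.2.2 ++ [fr.1])] acc from by
          simp [popNP_one, popNP_cons, hfr]]
        rw [List.append_assoc]
      · simp [popNP_one, popNP_cons, hfr] at he
  | cons fr2 σ ih =>
      intro fr b1 b2 b3 acc he
      by_cases hfr : fr.2.1 ≤ 0
      · rw [show pvPopNP (fr :: fr2 :: σ) ([] : List (List String))
            = pvPopNP ((fr2.1, fr2.2.1, fr2.2.2 ++ fr.2.2 ++ [fr.1]) :: σ) [] from by
          simp [popNP_one, popNP_cons, hfr]] at he ⊢
        rw [show pvPopNP ((fr :: fr2 :: σ) ++ [(b1, b2, b3)]) acc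
            = pvPopNP (((fr2.1, fr2.2.1, fr2.2.2 ++ fr.2.2 ++ [fr.1]) :: σ) ++ [(b1, b2, b3)]) acc from by
          simp [popNP_one, popNP_cons, hfr]]
        exact ih _ _ _ _ _ he
      · simp [popNP_cons, hfr] at he

-- with no NP frame ever opened, the machine does nothing
lemma alt_closed : ∀ (l : List String) (acc : List (List String)), "(NP" ∉ l →
    l.foldl pvStepNP ([], acc) = ([], acc) := by
  intro l
  induction l with
  | nil => intro acc _; rfl
  | cons s l ih =>
      intro acc hni
      have hs : s ≠ "(NP" := by intro h; exact hni (by simp [h])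
      simp only [List.foldl_cons]
      rw [show pvStepNP ([], acc) s = ([], acc) from by simp [pvStepNP, hs]]
      exact ih acc (fun h => hni (by simp [h]))

lemma fuel_len (np : List String) (s : String) (rest : List String) (f : Nat)
    (hf : np.length + (s :: rest).length ≤ f) : ((np ++ [s]).drop 1).length < f := by
  rw [List.length_drop, List.length_append]
  simp only [List.length_cons, List.length_nil] at hf ⊢
  omega

lemma pop_single_le (t : List String) (c : Int) (e acc : List (List String)) (h : c ≤ 0) :
    pvPopNP [(t, c, e)] acc = ([], acc ++ e ++ [t]) := by
  simp [popNP_one, h]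

lemma pop_single_gt (t : List String) (c : Int) (e acc : List (List String)) (h : ¬ c ≤ 0) :
    pvPopNP [(t, c, e)] acc = ([(t, c, e)], acc) := by
  simp [popNP_one, h]

lemma cNP1 : PySem.Chars.isIn ['('] ['(', 'N', 'P'] = true := by decide

lemma np_isIn : PySem.Chars.isIn ['('] (String.toList "(NP") = true := by decide

-- the main loop invariant: while A's frame (np, count) is open, B's machine is in
-- state `stateOf np count`, and from there both sides produce the same output
lemma loop_main (f : Nat)
    (HI : ∀ m : List String, m.length < f → make_NP_fuel f m = (runNP m).2) :
    ∀ (rest np : List String) (count : Int) (acc : List (List String)),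
      ((0 < count ∧ np ≠ [] ∧ (∀ g ∈ (runNP (np.drop 1)).1, g.2.1 < count)) ∨
        (count = 0 ∧ np = [])) →
      np.length + rest.length ≤ f →
      (rest.foldl pvStepNP (stateOf np count, acc)).2 = acc ++ make_NP_loop f rest count np := by
  intro rest
  induction rest with
  | nil =>
      intro np count acc _ _
      simp [make_NP_loop]
  | cons s rest ih =>
      intro np count acc hst hf
      rcases hst with ⟨hc, hnp, hm⟩ | ⟨hc0, hnp0⟩
      · -- open state
        have hcne : ¬ (count = 0) := by omega
        have hdrop : (np ++ [s]).drop 1 = np.drop 1 ++ [s] :=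
          List.drop_append_of_le_length (by cases np <;> simp_all)
        obtain ⟨σu, aB, hr⟩ : ∃ a b, runNP (np.drop 1) = (a, b) := ⟨_, _, rfl⟩
        have hm' : ∀ g ∈ σu, g.2.1 < count := by
          intro g hg; exact hm g (by rw [hr]; exact hg)
        have hso : stateOf np count = σu ++ [(np, count, aB)] := by
          simp only [stateOf, if_pos hc, hr]
        have hrun' : runNP ((np ++ [s]).drop 1) = pvStepNP (σu, aB) s := by
          rw [hdrop]
          show (np.drop 1 ++ [s]).foldl pvStepNP ([], []) = _
          rw [List.foldl_append]
          simp only [List.foldl_cons, List.foldl_nil]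
          exact congrArg (fun p => pvStepNP p s) hr
        simp only [List.foldl_cons, hso]
        by_cases hop : PySem.Chars.isIn ['('] s.toList = true
        · -- token contains '(': every frame appends it and increments; maybe push
          have hstep1 : pvStepNP (σu, aB) s =
              ((if s = "(NP" then ([s], (1:Int), ([] : List (List String))) ::
                    σu.map (fun g => (g.1 ++ [s], g.2.1 + 1, g.2.2))
                  else σu.map (fun g => (g.1 ++ [s], g.2.1 + 1, g.2.2))), aB) := by
            cases σu with
            | nil => by_cases h1 : s = "(NP" <;> simp [pvStepNP, h1]
            | cons u ut => by_cases h1 : s = "(NP" <;> simp [pvStepNP, hop, h1, cNP1]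
          have hstepB : pvStepNP (σu ++ [(np, count, aB)], acc) s =
              ((pvStepNP (σu, aB) s).1 ++ [(np ++ [s], count + 1, aB)], acc) := by
            rw [hstep1]
            by_cases h1 : s = "(NP" <;> simp [pvStepNP, hop, h1, cNP1]
          rw [hstepB]
          have hso' : stateOf (np ++ [s]) (count + 1) =
              (pvStepNP (σu, aB) s).1 ++ [(np ++ [s], count + 1, aB)] := by
            simp only [stateOf, if_pos (show (0:Int) < count + 1 by omega), hrun', hstep1]
          rw [← hso']
          have hmono2 : ∀ g ∈ (runNP ((np ++ [s]).drop 1)).1, g.2.1 < count + 1 := by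
            rw [hrun', hstep1]
            intro g hg
            by_cases h1 : s = "(NP"
            · rw [if_pos h1] at hg
              rcases List.mem_cons.mp hg with h2 | h2
              · rw [h2]; show (1:Int) < count + 1; omega
              · rcases List.mem_map.mp h2 with ⟨g0, hg0, rfl⟩
                have := hm' g0 hg0; simp; omega
            · rw [if_neg h1] at hg
              rcases List.mem_map.mp hg with ⟨g0, hg0, rfl⟩
              have := hm' g0 hg0; simp; omega
          have hopS : PySem.Str.isIn "(" s = true := by simpa using hop
          have hA : make_NP_loop f (s :: rest) count np
              = make_NP_loop f rest (count + 1) (np ++ [s]) := by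
            simp only [make_NP_loop, if_neg hcne, if_pos hopS]
            rw [if_neg (show ¬ (((count + 1 : Int), np ++ [s]).1 ≤ 0) from by
              show ¬ ((count + 1 : Int) ≤ 0); omega)]
          rw [hA]
          exact ih (np ++ [s]) (count + 1) acc (Or.inl ⟨by omega, by simp, hmono2⟩)
            (by simp at hf ⊢; omega)
        · by_cases hcl : PySem.Chars.isIn [')'] s.toList = true
          · -- token closes parens
            have hsne : s ≠ "(NP" := by
              intro h; rw [h] at hop; exact hop np_isIn
            have hA : make_NP_loop f (s :: rest) count np =
                (if count - (PySem.Str.count s ")" : Int) ≤ 0 then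
                  make_NP_fuel f ((np ++ [s]).drop 1) ++ [np ++ [s]] ++ make_NP_loop f rest 0 []
                else make_NP_loop f rest (count - (PySem.Str.count s ")" : Int)) (np ++ [s])) := by
              simp only [make_NP_loop, if_neg hcne]
              simp [hop, hcl]
            rw [hA]
            cases hσ : σu with
            | nil =>
              subst hσ
              have hrun2 : runNP ((np ++ [s]).drop 1) = ([], aB) := by
                rw [hrun']; simp [pvStepNP, hsne]
              have hstepB : pvStepNP ([] ++ [(np, count, aB)], acc) s =
                  pvPopNP [(np ++ [s], count - (PySem.Str.count s ")" : Int), aB)] acc := by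
                simp [pvStepNP, hop, hcl]
              rw [hstepB]
              by_cases hle : count - (PySem.Str.count s ")" : Int) ≤ 0
              · rw [if_pos hle]
                rw [pop_single_le (np ++ [s]) (count - (PySem.Str.count s ")" : Int)) aB acc hle]
                have hHI : make_NP_fuel f ((np ++ [s]).drop 1) = aB := by
                  rw [HI ((np ++ [s]).drop 1) (fuel_len np s rest f hf), hrun2]
                rw [hHI]
                have e2 := ih [] 0 (acc ++ aB ++ [np ++ [s]]) (Or.inr ⟨rfl, rfl⟩)
                  (by simp at hf ⊢; omega)
                rw [show stateOf [] 0 = [] from by simp [stateOf]] at e2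
                rw [e2]; simp
              · rw [if_neg hle]
                rw [pop_single_gt (np ++ [s]) (count - (PySem.Str.count s ")" : Int)) aB acc hle]
                have hso' : stateOf (np ++ [s]) (count - (PySem.Str.count s ")" : Int)) =
                    [(np ++ [s], count - (PySem.Str.count s ")" : Int), aB)] := by
                  simp only [stateOf,
                    if_pos (show (0:Int) < count - (PySem.Str.count s ")" : Int) by omega), hrun2]
                  simp
                rw [← hso']
                exact ih (np ++ [s]) _ acc
                  (Or.inl ⟨by omega, by simp, by rw [hrun2]; simp⟩)
                  (by simp at hf ⊢; omega)
            | cons u ut =>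
              subst hσ
              have hstepB : pvStepNP ((u :: ut) ++ [(np, count, aB)], acc) s =
                  pvPopNP (((u.1 ++ [s], u.2.1 - (PySem.Str.count s ")" : Int), u.2.2)
                      :: ut.map (fun g => (g.1 ++ [s], g.2.1 - (PySem.Str.count s ")" : Int), g.2.2)))
                    ++ [(np ++ [s], count - (PySem.Str.count s ")" : Int), aB)]) acc := by
                simp [pvStepNP, hop, hcl]
              have hrunS : runNP ((np ++ [s]).drop 1) =
                  pvPopNP ((u.1 ++ [s], u.2.1 - (PySem.Str.count s ")" : Int), u.2.2)
                      :: ut.map (fun g => (g.1 ++ [s], g.2.1 - (PySem.Str.count s ")" : Int), g.2.2))) aB := by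
                rw [hrun']; simp [pvStepNP, hop, hcl]
              rw [hstepB]
              cases hr0 : (pvPopNP ((u.1 ++ [s], u.2.1 - (PySem.Str.count s ")" : Int), u.2.2)
                      :: ut.map (fun g => (g.1 ++ [s], g.2.1 - (PySem.Str.count s ")" : Int), g.2.2))) []).1 with
              | cons h t =>
                rw [pop_append_ne _ _ _ acc h t hr0]
                have hΔ := pop_out_nil _ _ (by rw [hr0]; simp)
                have hrun2 : runNP ((np ++ [s]).drop 1) = (h :: t, aB) := by
                  rw [hrunS, pop_thread, hr0, hΔ]; simp
                have hcnts : ∀ g ∈ h :: t, g.2.1 < count - (PySem.Str.count s ")" : Int) := by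
                  intro g hg
                  have hg' : g ∈ (pvPopNP ((u.1 ++ [s], u.2.1 - (PySem.Str.count s ")" : Int), u.2.2)
                      :: ut.map (fun g => (g.1 ++ [s], g.2.1 - (PySem.Str.count s ")" : Int), g.2.2))) []).1 := by
                    rw [hr0]; exact hg
                  rcases pop_cnt_mem _ _ _ _ hg' with ⟨g', hgm, he⟩
                  have hex : ∃ g0 ∈ u :: ut, g'.2.1 = g0.2.1 - (PySem.Str.count s ")" : Int) := by
                    rcases List.mem_cons.mp hgm with h2 | h2
                    · exact ⟨u, by simp, by rw [h2]⟩
                    · rcases List.mem_map.mp h2 with ⟨g0, hg0, rfl⟩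
                      exact ⟨g0, by simp [hg0], rfl⟩
                  rcases hex with ⟨g0, hg0, he0⟩
                  have := hm' g0 hg0
                  omega
                have hpos : 0 < count - (PySem.Str.count s ")" : Int) := by
                  have h1 := pop_head_pos _ _ _ h t hr0
                  have h2 := hcnts h (by simp)
                  omega
                rw [if_neg (by omega)]
                have hso' : stateOf (np ++ [s]) (count - (PySem.Str.count s ")" : Int)) =
                    (h :: t) ++ [(np ++ [s], count - (PySem.Str.count s ")" : Int), aB)] := by
                  simp only [stateOf, if_pos hpos, hrun2]
                rw [← hso']
                exact ih (np ++ [s]) _ acc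
                  (Or.inl ⟨hpos, by simp, by rw [hrun2]; exact hcnts⟩)
                  (by simp at hf ⊢; omega)
              | nil =>
                rw [pop_append_nil _ _ _ _ _ acc hr0]
                have hrun2 : runNP ((np ++ [s]).drop 1) =
                    ([], aB ++ (pvPopNP ((u.1 ++ [s], u.2.1 - (PySem.Str.count s ")" : Int), u.2.2)
                      :: ut.map (fun g => (g.1 ++ [s], g.2.1 - (PySem.Str.count s ")" : Int), g.2.2))) []).2) := by
                  rw [hrunS, pop_thread, hr0]
                by_cases hle : count - (PySem.Str.count s ")" : Int) ≤ 0
                · rw [if_pos hle]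
                  rw [pop_single_le (np ++ [s]) (count - (PySem.Str.count s ")" : Int)) _ acc hle]
                  have hHI : make_NP_fuel f ((np ++ [s]).drop 1)
                      = aB ++ (pvPopNP ((u.1 ++ [s], u.2.1 - (PySem.Str.count s ")" : Int), u.2.2)
                      :: ut.map (fun g => (g.1 ++ [s], g.2.1 - (PySem.Str.count s ")" : Int), g.2.2))) []).2 := by
                    rw [HI ((np ++ [s]).drop 1) (fuel_len np s rest f hf), hrun2]
                  rw [hHI]
                  have e2 := ih [] 0 (acc ++ (aB ++ (pvPopNP ((u.1 ++ [s], u.2.1 - (PySem.Str.count s ")" : Int), u.2.2)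
                      :: ut.map (fun g => (g.1 ++ [s], g.2.1 - (PySem.Str.count s ")" : Int), g.2.2))) []).2) ++ [np ++ [s]])
                    (Or.inr ⟨rfl, rfl⟩) (by simp at hf ⊢; omega)
                  rw [show stateOf [] 0 = [] from by simp [stateOf]] at e2
                  rw [e2]; simp
                · rw [if_neg hle]
                  rw [pop_single_gt (np ++ [s]) (count - (PySem.Str.count s ")" : Int)) _ acc hle]
                  have hso' : stateOf (np ++ [s]) (count - (PySem.Str.count s ")" : Int)) =
                      [(np ++ [s], count - (PySem.Str.count s ")" : Int),
                        aB ++ (pvPopNP ((u.1 ++ [s], u.2.1 - (PySem.Str.count s ")" : Int), u.2.2)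
                      :: ut.map (fun g => (g.1 ++ [s], g.2.1 - (PySem.Str.count s ")" : Int), g.2.2))) []).2)] := by
                    simp only [stateOf,
                      if_pos (show (0:Int) < count - (PySem.Str.count s ")" : Int) by omega), hrun2]
                    simp
                  rw [← hso']
                  exact ih (np ++ [s]) _ acc
                    (Or.inl ⟨by omega, by simp, by rw [hrun2]; simp⟩)
                    (by simp at hf ⊢; omega)
          · -- token without parens: ignored by both sides
            have hstepB : pvStepNP (σu ++ [(np, count, aB)], acc) s
                = (σu ++ [(np, count, aB)], acc) := by
              simp [pvStepNP, hop, hcl]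
            rw [hstepB, ← hso]
            have hA : make_NP_loop f (s :: rest) count np = make_NP_loop f rest count np := by
              simp only [make_NP_loop, if_neg hcne]
              simp [hop, hcl]
              omega
            rw [hA]
            exact ih np count acc (Or.inl ⟨hc, hnp, hm⟩) (by simp at hf ⊢; omega)
      · -- closed state
        subst hc0; subst hnp0
        rw [show stateOf [] 0 = [] from by simp [stateOf]]
        simp only [List.foldl_cons]
        by_cases hs : s = "(NP"
        · subst hs
          rw [show pvStepNP ([], acc) "(NP" = ([(["(NP"], 1, [])], acc) from by simp [pvStepNP]]
          have hA : make_NP_loop f ("(NP" :: rest) 0 [] = make_NP_loop f rest 1 ["(NP"] := by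
            simp [make_NP_loop]
          rw [hA]
          rw [show ([(["(NP"], (1:Int), ([] : List (List String)))] : List NPFrame)
              = stateOf ["(NP"] 1 from by simp [stateOf, runNP]]
          exact ih ["(NP"] 1 acc (Or.inl ⟨by omega, by simp, by simp [runNP]⟩)
            (by simp at hf ⊢; omega)
        · rw [show pvStepNP ([], acc) s = ([], acc) from by simp [pvStepNP, hs]]
          have hA : make_NP_loop f (s :: rest) 0 [] = make_NP_loop f rest 0 [] := by
            simp [make_NP_loop, hs]
          rw [hA]
          rw [show ([] : List NPFrame) = stateOf [] 0 from by simp [stateOf]]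
          exact ih [] 0 acc (Or.inr ⟨rfl, rfl⟩) (by simp at hf ⊢; omega)

lemma fuel_eq : ∀ (f : Nat) (l : List String), l.length < f → make_NP_fuel f l = (runNP l).2 := by
  intro f
  induction f with
  | zero => intro l h; omega
  | succ f ihf =>
      intro l h
      by_cases hin : "(NP" ∈ l
      · have e1 : make_NP_fuel (f + 1) l = make_NP_loop f l 0 [] := by
          simp only [make_NP_fuel, if_pos hin]
        have e2 := loop_main f ihf l [] 0 [] (Or.inr ⟨rfl, rfl⟩) (by simp; omega)
        rw [show stateOf [] 0 = [] from by simp [stateOf]] at e2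
        rw [e1, show runNP l = l.foldl pvStepNP ([], []) from rfl, e2]
        simp
      · have e1 : make_NP_fuel (f + 1) l = [] := by
          simp only [make_NP_fuel, if_neg hin]
        rw [e1, show runNP l = l.foldl pvStepNP ([], []) from rfl, alt_closed l [] hin]

-- ===== VERDICT (by name: the statement is the Claim_ definition above) =====
theorem make_NP_split_list_spec : Claim_equal_make_NP_split_list := by
  intro l _
  unfold Spec_make_NP_split_list make_NP_split_list make_NP_split_list_alt
  rw [fuel_eq (l.length + 1) l (by omega)]
  rfl
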